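-- pv_equiv track=rewrite | github.com/Hybrydyzacja/pp1 | 12-Test3/mock2/p1.py | f
-- ===== SOURCE A (Python) =====
-- def f(n):
--     number_list = []
--     for number in str(n):
--         number = int(number)
--         if number % 2 != 0:
--             number_list.append(number)
--         else:
--             continue
--     if len(number_list) > 0:
--         minumum = min(number_list)
--         maximum = max(number_list)
--     else:
--         return -1
--
--
--     return(maximum-minumum)
-- ===== SOURCE B (Python) =====
-- def f(n):
--     lo = hi = None
--     for ch in str(n):
--         d = int(ch)
--         if d % 2 != 0:
--             if lo is None:
--                 lo = hi = d
--             else: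
--                 if d < lo:
--                     lo = d
--                 if d > hi:
--                     hi = d
--     return -1 if lo is None else hi - lo
-- ===== Notes on version B (the rewrite author's own statement) =====
-- stated objective: simpler
-- what changed: single pass keeping running min/max scalars instead of building a list of odd digits and scanning it again with min() and max()
import Mathlib
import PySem

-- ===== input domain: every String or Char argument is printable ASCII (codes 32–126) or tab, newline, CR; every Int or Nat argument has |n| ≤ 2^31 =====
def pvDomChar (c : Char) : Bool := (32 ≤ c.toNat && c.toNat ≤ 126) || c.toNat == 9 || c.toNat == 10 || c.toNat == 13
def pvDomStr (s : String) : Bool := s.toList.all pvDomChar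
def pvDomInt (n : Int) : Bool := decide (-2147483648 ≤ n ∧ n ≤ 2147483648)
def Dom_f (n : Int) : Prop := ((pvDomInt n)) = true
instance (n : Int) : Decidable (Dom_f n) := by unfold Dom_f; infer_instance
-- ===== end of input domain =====

-- B replaces A's build-a-list-then-min()-then-max() three passes by one pass over the digits
-- keeping two running scalars (objective: simpler).


-- ===== PORT A =====
-- int(ch) for one char of str(n): exact under Pre_f (0 ≤ n), where every char of str(n) is a digit
def pyDigit (c : Char) : Int := (c.toNat : Int) - 48

def f (n : Int) : Int :=
  let number_list : List Int :=
    (PySem.Int.toChars n).foldl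
      (fun acc c =>
        let number := pyDigit c
        if PySem.Int.mod number 2 ≠ 0 then acc ++ [number] else acc) []
  if number_list.length > 0 then
    -- min(number_list) / max(number_list); the guard makes them some, getD 0 is never taken
    ((PySem.List.max? number_list (fun x => x)).getD 0) -
      ((PySem.List.min? number_list (fun x => x)).getD 0)
  else -1

-- ===== PORT B =====
def f_alt (n : Int) : Int :=
  let st : Option (Int × Int) :=
    (PySem.Int.toChars n).foldl
      (fun acc c =>
        let d := pyDigit c
        if PySem.Int.mod d 2 ≠ 0 then
          match acc with
          | none => some (d, d)
          | some (lo, hi) => some (if d < lo then d else lo, if d > hi then d else hi)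
        else acc) none
  match st with
  | none => -1
  | some (lo, hi) => hi - lo

-- ===== PRECONDITION & SPEC =====
-- Pre_f excludes negative n, on which Python's int('-') raises ValueError.
def Pre_f (n : Int) : Prop := 0 ≤ n
instance (n : Int) : Decidable (Pre_f n) := by unfold Pre_f; infer_instance
def pvWitness_f : Int := 135

def Spec_f (n : Int) (out : Int) : Prop := out = f_alt n
instance (n : Int) (out : Int) : Decidable (Spec_f n out) := by unfold Spec_f; infer_instance

-- ===== CLAIM (what is proved, stated in full; the proofs are below) =====
def Claim_equal_f : Prop := ∀ (n : Int), Dom_f n → Pre_f n → Spec_f n (f n)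

-- ===== LEMMAS AND PROOFS =====

-- B's accumulator as a function of A's accumulated list
def enc : List Int → Option (Int × Int)
  | [] => none
  | x :: t => some (t.foldl min x, t.foldl max x)

theorem min_eq_ite (a d : Int) : (if d < a then d else a) = min a d := by
  split <;> omega

theorem max_eq_ite (a d : Int) : (if d > a then d else a) = max a d := by
  split <;> omega

theorem fold_enc (cs : List Char) (acc : List Int) :
    cs.foldl
      (fun st c =>
        let d := pyDigit c
        if PySem.Int.mod d 2 ≠ 0 then
          match st with
          | none => some (d, d)
          | some (lo, hi) => some (if d < lo then d else lo, if d > hi then d else hi)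
        else st) (enc acc)
    = enc (cs.foldl
        (fun a c =>
          let number := pyDigit c
          if PySem.Int.mod number 2 ≠ 0 then a ++ [number] else a) acc) := by
  induction cs generalizing acc with
  | nil => rfl
  | cons c cs ih =>
    simp only [List.foldl_cons]
    by_cases h : PySem.Int.mod (pyDigit c) 2 ≠ 0
    · rw [if_pos h, if_pos h, ← ih (acc ++ [pyDigit c])]
      congr 1
      cases acc with
      | nil => simp [enc]
      | cons x t => simp [enc, List.foldl_append, min_eq_ite, max_eq_ite]
    · rw [if_neg h, if_neg h]
      exact ih acc

-- ===== VERDICT (by name: the statement is the Claim_ definition above) =====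
theorem f_spec : Claim_equal_f := by
  intro n _ _
  unfold Spec_f f f_alt
  rw [show (none : Option (Int × Int)) = enc [] from rfl, fold_enc]
  cases h : (PySem.Int.toChars n).foldl
      (fun a c =>
        let number := pyDigit c
        if PySem.Int.mod number 2 ≠ 0 then a ++ [number] else a) [] with
  | nil => simp [enc]
  | cons x t =>
    simp [enc, PySem.List.max?_id_cons, PySem.List.min?_id_cons]
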